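-- pv_equiv track=rewrite | github.com/tobiapoppi/AdventOfCode | 2024/08.py | part2
-- ===== SOURCE A (Python) =====
-- def get_nodes(data):
--     nodes = {}
--     for i, row in enumerate(data):
--         for j, cell in enumerate(row):
--             if cell != ".":
--                 if cell not in nodes:
--                     nodes[cell] = []
--                 nodes[cell].append((i, j))
--     return nodes
--
-- def find_antinodes_2(data, a, b):
--     anti = set()
--     anti.add(a)
--     anti.add(b)
--     diff = (a[0] - b[0], a[1] - b[1])
--     antinode_a = (a[0] + diff[0], a[1] + diff[1])
--     while 0 <= antinode_a[0] < len(data) and 0 <= antinode_a[1] < len(data[0]):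
--         anti.add(antinode_a)
--         a = antinode_a
--         antinode_a = (a[0] + diff[0], a[1] + diff[1])
--     antinode_b = (b[0] - diff[0], b[1] - diff[1])
--     while 0 <= antinode_b[0] < len(data) and 0 <= antinode_b[1] < len(data[0]):
--         anti.add(antinode_b)
--         b = antinode_b
--         antinode_b = (b[0] - diff[0], b[1] - diff[1])
--     return anti
--
-- def part2(data):
--     data = data.strip().split("\n")
--     data = [list(line) for line in data]
--     nodes = get_nodes(data)
--     antinodes = set()
--     for _, vals in nodes.items():
--         if len(vals) == 1:
--             continue
--         for i in range(len(vals)):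
--             for j in range(i + 1, len(vals)):
--                 a = (vals[i][0], vals[i][1])
--                 b = (vals[j][0], vals[j][1])
--                 anti = find_antinodes_2(data, a, b)
--                 antinodes.update(anti)
--     return len(antinodes)
-- ===== SOURCE B (Python) =====
-- def _on_line(pr, pc, dr, dc):
--     # exists integer k with (pr, pc) == (k*dr, k*dc)
--     if dr != 0:
--         return pr % dr == 0 and pc * dr == pr * dc
--     if dc != 0:
--         return pr == 0 and pc % dc == 0
--     return pr == 0 and pc == 0
--
-- def part2(data):
--     grid = data.strip().split("\n")
--     R, C = len(grid), len(grid[0])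
--     ants = {}
--     for i, row in enumerate(grid):
--         for j, c in enumerate(row):
--             if c != ".":
--                 ants.setdefault(c, []).append((i, j))
--     pairs = []
--     for ps in ants.values():
--         for i in range(len(ps)):
--             for j in range(i + 1, len(ps)):
--                 pairs.append((ps[i], ps[j]))
--     count = 0
--     for r in range(R):
--         for c in range(C):
--             if any(_on_line(r - b[0], c - b[1], a[0] - b[0], a[1] - b[1])
--                    for a, b in pairs):
--                 count += 1
--     return count
-- ===== Notes on version B (the rewrite author's own statement) =====
-- stated objective: alternative
-- what changed: A traces each antenna pair's line with two outward while-loops collecting points into a set and returns its size; B never walks lines at all: it scans every grid cell once and counts the cells whose offset from some pair's antenna is an exact integer multiple of the pair's difference vector (a closed-form divisibility test), trading the set union for a direct count.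
-- outside the precondition, e.g. on part2('a\nAA'): A returns 2, B returns 1
import Mathlib
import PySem

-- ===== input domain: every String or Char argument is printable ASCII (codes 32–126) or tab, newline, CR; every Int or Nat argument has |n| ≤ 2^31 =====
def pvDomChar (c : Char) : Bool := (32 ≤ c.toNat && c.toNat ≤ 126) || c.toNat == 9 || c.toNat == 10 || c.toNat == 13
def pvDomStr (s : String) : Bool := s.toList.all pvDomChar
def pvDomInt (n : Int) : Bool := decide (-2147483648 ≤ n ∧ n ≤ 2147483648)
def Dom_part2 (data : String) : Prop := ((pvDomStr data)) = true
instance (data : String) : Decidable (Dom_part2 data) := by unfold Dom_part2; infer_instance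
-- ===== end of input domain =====

-- B replaces A's per-pair line walks (two outward while-loops into a set) by a single scan of the
-- grid that counts cells passing a closed-form integer-multiple test against some antenna pair
-- (objective: alternative).

-- ===== PORT A =====
-- '0 <= x < R and 0 <= y < C' (shared bounds test; both Pythons inline this comparison chain)
def pvInGrid (R C : Int) (p : Int × Int) : Bool :=
  decide (0 ≤ p.1) && decide (p.1 < R) && decide (0 ≤ p.2) && decide (p.2 < C)

-- first while-loop of find_antinodes_2: step +diff from a while in grid (fuel makes it total; R+C+2 steps always suffice)
def paFwd (R C : Int) (d : Int × Int) : Nat → Int × Int → PySem.Set (Int × Int) → PySem.Set (Int × Int)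
  | 0, _, s => s
  | f+1, a, s =>
    let n := (a.1 + d.1, a.2 + d.2)
    if pvInGrid R C n then paFwd R C d f n (PySem.Set.add s n) else s

-- second while-loop: step -diff from b
def paBwd (R C : Int) (d : Int × Int) : Nat → Int × Int → PySem.Set (Int × Int) → PySem.Set (Int × Int)
  | 0, _, s => s
  | f+1, b, s =>
    let n := (b.1 - d.1, b.2 - d.2)
    if pvInGrid R C n then paBwd R C d f n (PySem.Set.add s n) else s

def paFind (R C : Int) (a b : Int × Int) : PySem.Set (Int × Int) :=
  let anti := PySem.Set.add (PySem.Set.add PySem.Set.empty a) b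
  let d := (a.1 - b.1, a.2 - b.2)
  paBwd R C d ((R + C).toNat + 2) b (paFwd R C d ((R + C).toNat + 2) a anti)

def paGetNodes (rows : List (List Char)) : PySem.Dict Char (List (Int × Int)) :=
  (PySem.List.enumerate rows 0).foldl (fun nodes ir =>
    (PySem.List.enumerate ir.2 0).foldl (fun nodes jc =>
      if jc.2 ≠ '.' then
        let nodes1 := if ¬ nodes.contains jc.2 then nodes.insert jc.2 [] else nodes
        nodes1.insert jc.2 (nodes1.getD jc.2 [] ++ [(ir.1, jc.1)])
      else nodes) nodes) PySem.Dict.empty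

def part2 (data : String) : Int :=
  let rows := ((PySem.Str.split? (PySem.Str.strip data) "\n").getD []).map String.toList
  let nodes := paGetNodes rows
  let R : Int := rows.length
  let C : Int := (rows.headD []).length
  let antinodes := nodes.items.foldl (fun s kv =>
    if kv.2.length == 1 then s
    else (PySem.List.pyRange 0 kv.2.length 1).foldl (fun s i =>
      (PySem.List.pyRange (i+1) kv.2.length 1).foldl (fun s j =>
        let a := ((PySem.List.pyGetD kv.2 i ((0:Int),(0:Int))).1, (PySem.List.pyGetD kv.2 i ((0:Int),(0:Int))).2)
        let b := ((PySem.List.pyGetD kv.2 j ((0:Int),(0:Int))).1, (PySem.List.pyGetD kv.2 j ((0:Int),(0:Int))).2)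
        PySem.Set.update s (paFind R C a b)) s) s) PySem.Set.empty
  PySem.Set.len antinodes

-- ===== PORT B =====
-- _on_line of Source B: does an integer k exist with (pr, pc) == (k*dr, k*dc)?
def pbOnLine (pr pc dr dc : Int) : Bool :=
  if dr ≠ 0 then decide (PySem.Int.mod pr dr = 0) && decide (pc * dr = pr * dc)
  else if dc ≠ 0 then decide (pr = 0) && decide (PySem.Int.mod pc dc = 0)
  else decide (pr = 0) && decide (pc = 0)

def pbAnts (grid : List String) : PySem.Dict Char (List (Int × Int)) :=
  (PySem.List.enumerate grid 0).foldl (fun ants ir =>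
    (PySem.List.enumerate ir.2.toList 0).foldl (fun ants jc =>
      if jc.2 ≠ '.' then
        let a1 := ants.setdefault jc.2 []
        a1.insert jc.2 (a1.getD jc.2 [] ++ [(ir.1, jc.1)])
      else ants) ants) PySem.Dict.empty

def part2_alt (data : String) : Int :=
  let grid := (PySem.Str.split? (PySem.Str.strip data) "\n").getD []
  let R : Int := grid.length
  let C : Int := PySem.Str.len (grid.headD "")
  let ants := pbAnts grid
  let pairs := ants.values.foldl (fun ps l =>
    (PySem.List.pyRange 0 l.length 1).foldl (fun ps i =>
      (PySem.List.pyRange (i+1) l.length 1).foldl (fun ps j =>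
        ps ++ [(PySem.List.pyGetD l i ((0:Int),(0:Int)), PySem.List.pyGetD l j ((0:Int),(0:Int)))]) ps) ps)
    ([] : List ((Int × Int) × (Int × Int)))
  (PySem.List.pyRange 0 R 1).foldl (fun cnt r =>
    (PySem.List.pyRange 0 C 1).foldl (fun cnt c =>
      if pairs.any (fun ab => pbOnLine (r - ab.2.1) (c - ab.2.2) (ab.1.1 - ab.2.1) (ab.1.2 - ab.2.2))
      then cnt + 1 else cnt) cnt) (0 : Int)

-- ===== PRECONDITION & SPEC =====
-- Pre_ excludes ragged grids in which some antenna sits at a column index ≥ the length of the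
-- first line: there A's row-0-based column bound counts out-of-bound antennas unconditionally and
-- truncates line runs at accidental first exits — a corner no rectangular-grid spec covers.
def Pre_part2 (data : String) : Prop :=
  ∀ row ∈ (PySem.Str.split? (PySem.Str.strip data) "\n").getD [],
    ∀ p ∈ PySem.List.enumerate row.toList 0,
      p.2 ≠ '.' → p.1 < PySem.Str.len (((PySem.Str.split? (PySem.Str.strip data) "\n").getD []).headD "")
instance (data : String) : Decidable (Pre_part2 data) := by unfold Pre_part2; infer_instance

def pvWitness_part2 : String := "aA.\nAa.\n..A"

def Spec_part2 (data : String) (out : Int) : Prop := out = part2_alt data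
instance (data : String) (out : Int) : Decidable (Spec_part2 data out) := by unfold Spec_part2; infer_instance

-- ===== CLAIM =====
def Claim_equal_part2 : Prop := ∀ (data : String), Dom_part2 data → Pre_part2 data → Spec_part2 data (part2 data)

-- ===== LEMMAS AND PROOFS =====
def pvPt (b d : Int × Int) (k : Int) : Int × Int := (b.1 + k * d.1, b.2 + k * d.2)

theorem pvPt_zero (b d : Int × Int) : pvPt b d 0 = b := by simp [pvPt]

theorem pvPt_one (b d : Int × Int) : pvPt b d 1 = (b.1 + d.1, b.2 + d.2) := by simp [pvPt]

theorem pvPt_shift (b d : Int × Int) (t m : Int) : pvPt (pvPt b d t) d m = pvPt b d (t + m) := by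
  simp only [pvPt, Prod.mk.injEq]; constructor <;> ring

theorem mem_paFwd (R C : Int) (d : Int × Int) :
    ∀ (f : Nat) (a : Int × Int) (s : PySem.Set (Int × Int)) (x : Int × Int),
      x ∈ paFwd R C d f a s ↔ x ∈ s ∨ ∃ k : Nat, k < f ∧
        (∀ j : Nat, j ≤ k → pvInGrid R C (pvPt a d ((j : Int) + 1)) = true) ∧
        x = pvPt a d ((k : Int) + 1) := by
  intro f
  induction f with
  | zero => intro a s x; simp [paFwd]
  | succ f ih =>
    intro a s x
    show x ∈ (if pvInGrid R C (a.1 + d.1, a.2 + d.2) then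
        paFwd R C d f (a.1 + d.1, a.2 + d.2) (PySem.Set.add s (a.1 + d.1, a.2 + d.2)) else s) ↔ _
    rw [← pvPt_one]
    by_cases h : pvInGrid R C (pvPt a d 1) = true
    · rw [if_pos h, ih]
      rw [PySem.Set.mem_add]
      constructor
      · rintro ((hx | rfl) | ⟨k, hk, hch, rfl⟩)
        · exact Or.inl hx
        · exact Or.inr ⟨0, by omega, by intro j hj; interval_cases j; simpa using h, by norm_num⟩
        · refine Or.inr ⟨k + 1, by omega, ?_, ?_⟩
          · intro j hj
            rcases Nat.eq_zero_or_pos j with rfl | hpos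
            · simpa using h
            · have := hch (j - 1) (by omega)
              rw [pvPt_shift] at this
              convert this using 3
              push_cast; omega
          · rw [pvPt_shift]; congr 1; push_cast; ring
      · rintro (hx | ⟨k, hk, hch, rfl⟩)
        · exact Or.inl (Or.inl hx)
        · rcases Nat.eq_zero_or_pos k with rfl | hpos
          · exact Or.inl (Or.inr (by norm_num))
          · refine Or.inr ⟨k - 1, by omega, ?_, ?_⟩
            · intro j hj
              have := hch (j + 1) (by omega)
              rw [pvPt_shift]
              convert this using 3
              push_cast; ring
            · rw [pvPt_shift]; congr 1; push_cast; omega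
    · rw [if_neg h]
      constructor
      · exact Or.inl
      · rintro (hx | ⟨k, hk, hch, rfl⟩)
        · exact hx
        · exact absurd (by simpa using hch 0 (by omega)) h

theorem mem_paBwd (R C : Int) (d : Int × Int) :
    ∀ (f : Nat) (b : Int × Int) (s : PySem.Set (Int × Int)) (x : Int × Int),
      x ∈ paBwd R C d f b s ↔ x ∈ s ∨ ∃ k : Nat, k < f ∧
        (∀ j : Nat, j ≤ k → pvInGrid R C (pvPt b d (-((j : Int) + 1))) = true) ∧
        x = pvPt b d (-((k : Int) + 1)) := by
  intro f
  induction f with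
  | zero => intro b s x; simp [paBwd]
  | succ f ih =>
    intro b s x
    show x ∈ (if pvInGrid R C (b.1 - d.1, b.2 - d.2) then
        paBwd R C d f (b.1 - d.1, b.2 - d.2) (PySem.Set.add s (b.1 - d.1, b.2 - d.2)) else s) ↔ _
    have hm1 : (b.1 - d.1, b.2 - d.2) = pvPt b d (-1) := by simp [pvPt]; constructor <;> ring
    rw [hm1]
    by_cases h : pvInGrid R C (pvPt b d (-1)) = true
    · rw [if_pos h, ih]
      rw [PySem.Set.mem_add]
      constructor
      · rintro ((hx | rfl) | ⟨k, hk, hch, rfl⟩)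
        · exact Or.inl hx
        · exact Or.inr ⟨0, by omega, by intro j hj; interval_cases j; simpa using h, by norm_num⟩
        · refine Or.inr ⟨k + 1, by omega, ?_, ?_⟩
          · intro j hj
            rcases Nat.eq_zero_or_pos j with rfl | hpos
            · simpa using h
            · have := hch (j - 1) (by omega)
              rw [pvPt_shift] at this
              convert this using 3
              push_cast; omega
          · rw [pvPt_shift]; congr 1; push_cast; ring
      · rintro (hx | ⟨k, hk, hch, rfl⟩)
        · exact Or.inl (Or.inl hx)
        · rcases Nat.eq_zero_or_pos k with rfl | hpos
          · exact Or.inl (Or.inr (by norm_num))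
          · refine Or.inr ⟨k - 1, by omega, ?_, ?_⟩
            · intro j hj
              have := hch (j + 1) (by omega)
              rw [pvPt_shift]
              convert this using 3
              push_cast; ring
            · rw [pvPt_shift]; congr 1; push_cast; omega
    · rw [if_neg h]
      constructor
      · exact Or.inl
      · rintro (hx | ⟨k, hk, hch, rfl⟩)
        · exact hx
        · exact absurd (by simpa using hch 0 (by omega)) h

theorem pvChainBound (R C : Int) (d : Int × Int) (hd : d ≠ (0, 0)) (q : Int × Int) (t : Nat)
    (hch : ∀ j : Nat, j ≤ t → pvInGrid R C (pvPt q d (j : Int)) = true) : (t : Int) < R + C := by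
  have h0 := hch 0 (by omega)
  have ht := hch t (by omega)
  simp only [pvInGrid, pvPt, Bool.and_eq_true, decide_eq_true_eq] at h0 ht
  have hd' : d.1 ≠ 0 ∨ d.2 ≠ 0 := by
    by_contra hc
    push_neg at hc
    exact hd (Prod.ext hc.1 hc.2)
  rcases hd' with h1 | h2
  · rcases lt_or_gt_of_ne h1 with hneg | hpos
    · have : (t : Int) * d.1 ≤ (t : Int) * (-1) := by
        apply mul_le_mul_of_nonneg_left (by omega) (by positivity)
      omega
    · have : (t : Int) * 1 ≤ (t : Int) * d.1 := by
        apply mul_le_mul_of_nonneg_left (by omega) (by positivity)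
      omega
  · rcases lt_or_gt_of_ne h2 with hneg | hpos
    · have : (t : Int) * d.2 ≤ (t : Int) * (-1) := by
        apply mul_le_mul_of_nonneg_left (by omega) (by positivity)
      omega
    · have : (t : Int) * 1 ≤ (t : Int) * d.2 := by
        apply mul_le_mul_of_nonneg_left (by omega) (by positivity)
      omega

theorem paFwd_fix (R C : Int) (a : Int × Int) :
    ∀ (f : Nat) (s : PySem.Set (Int × Int)), a ∈ s → paFwd R C (0, 0) f a s = s := by
  intro f
  induction f with
  | zero => intro s _; rfl
  | succ f ih =>
    intro s ha
    show (if pvInGrid R C (a.1 + 0, a.2 + 0) then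
        paFwd R C (0,0) f (a.1 + 0, a.2 + 0) (PySem.Set.add s (a.1 + 0, a.2 + 0)) else s) = s
    have he : (a.1 + 0, a.2 + 0) = a := by simp
    rw [he]
    by_cases h : pvInGrid R C a = true
    · rw [if_pos h, PySem.Set.add_of_mem ha, ih s ha]
    · rw [if_neg h]

theorem paBwd_fix (R C : Int) (b : Int × Int) :
    ∀ (f : Nat) (s : PySem.Set (Int × Int)), b ∈ s → paBwd R C (0, 0) f b s = s := by
  intro f
  induction f with
  | zero => intro s _; rfl
  | succ f ih =>
    intro s hb
    show (if pvInGrid R C (b.1 - 0, b.2 - 0) then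
        paBwd R C (0,0) f (b.1 - 0, b.2 - 0) (PySem.Set.add s (b.1 - 0, b.2 - 0)) else s) = s
    have he : (b.1 - 0, b.2 - 0) = b := by simp
    rw [he]
    by_cases h : pvInGrid R C b = true
    · rw [if_pos h, PySem.Set.add_of_mem hb, ih s hb]
    · rw [if_neg h]

-- convexity of the grid along a lattice line, one coordinate at a time
theorem pvCoordBetween (x d R k m : Int) (h0 : 0 ≤ x) (h0' : x < R)
    (hk : 0 ≤ x + k * d) (hk' : x + k * d < R)
    (hm : (0 ≤ m ∧ m ≤ k) ∨ (k ≤ m ∧ m ≤ 0)) : 0 ≤ x + m * d ∧ x + m * d < R := by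
  rcases hm with ⟨hm0, hmk⟩ | ⟨hkm, hm0⟩
  · rcases le_or_gt 0 d with hd | hd
    · have h1 : 0 ≤ m * d := mul_nonneg hm0 hd
      have h2 : m * d ≤ k * d := mul_le_mul_of_nonneg_right hmk hd
      omega
    · have h1 : m * d ≤ 0 := mul_nonpos_of_nonneg_of_nonpos hm0 (by omega)
      have h2 : k * d ≤ m * d := mul_le_mul_of_nonpos_right hmk (by omega)
      omega
  · rcases le_or_gt 0 d with hd | hd
    · have h1 : m * d ≤ 0 := mul_nonpos_of_nonpos_of_nonneg hm0 hd
      have h2 : k * d ≤ m * d := mul_le_mul_of_nonneg_right hkm hd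
      omega
    · have h1 : 0 ≤ m * d := by nlinarith
      have h2 : m * d ≤ k * d := mul_le_mul_of_nonpos_right hkm (by omega)
      omega

theorem pvConvex (R C : Int) (b d : Int × Int) (k m : Int)
    (hb : pvInGrid R C b = true) (hk : pvInGrid R C (pvPt b d k) = true)
    (hm : (0 ≤ m ∧ m ≤ k) ∨ (k ≤ m ∧ m ≤ 0)) : pvInGrid R C (pvPt b d m) = true := by
  simp only [pvInGrid, pvPt, Bool.and_eq_true, decide_eq_true_eq] at hb hk ⊢
  have c1 := pvCoordBetween b.1 d.1 R k m hb.1.1.1 hb.1.1.2 hk.1.1.1 hk.1.1.2 hm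
  have c2 := pvCoordBetween b.2 d.2 C k m hb.1.2 hb.2 hk.1.2 hk.2 hm
  exact ⟨⟨⟨c1.1, c1.2⟩, c2.1⟩, c2.2⟩

-- A's per-pair set is exactly the in-grid lattice points of the line through b with step a-b
theorem memFind (R C : Int) (a b : Int × Int)
    (ha : pvInGrid R C a = true) (hb : pvInGrid R C b = true) (x : Int × Int) :
    x ∈ paFind R C a b ↔
      pvInGrid R C x = true ∧ ∃ k : Int, x = pvPt b (a.1 - b.1, a.2 - b.2) k := by
  set d : Int × Int := (a.1 - b.1, a.2 - b.2) with hdd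
  set F : Nat := (R + C).toNat + 2 with hF
  have hpa : pvPt b d 1 = a := by
    simp only [pvPt, hdd]
    exact Prod.ext (by dsimp; ring) (by dsimp; ring)
  have hfind : paFind R C a b =
      paBwd R C d F b (paFwd R C d F a (PySem.Set.add (PySem.Set.add PySem.Set.empty a) b)) := rfl
  have hbase : ∀ y : Int × Int, y ∈ PySem.Set.add (PySem.Set.add PySem.Set.empty a) b ↔
      y = a ∨ y = b := by
    intro y
    rw [PySem.Set.mem_add, PySem.Set.mem_add]
    simp [PySem.Set.empty]
  by_cases hd0 : d = ((0 : Int), (0 : Int))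
  · have hab : a = b := by
      have h1 : a.1 - b.1 = 0 := congrArg Prod.fst (hdd ▸ hd0)
      have h2 : a.2 - b.2 = 0 := congrArg Prod.snd (hdd ▸ hd0)
      exact Prod.ext (by omega) (by omega)
    subst hab
    have hmem : a ∈ PySem.Set.add (PySem.Set.add PySem.Set.empty a) a := by
      rw [PySem.Set.mem_add]; exact Or.inr rfl
    rw [hfind, hd0, paFwd_fix R C a F _ hmem, paBwd_fix R C a F _ hmem, hbase]
    constructor
    · rintro (rfl | rfl)
      · exact ⟨ha, 0, by simp [pvPt]⟩
      · exact ⟨ha, 0, by simp [pvPt]⟩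
    · rintro ⟨_, k, rfl⟩
      left
      simp [pvPt]
  · rw [hfind, mem_paBwd, mem_paFwd, hbase]
    have hshifta : ∀ k : Int, pvPt a d k = pvPt b d (1 + k) := by
      intro k; rw [← hpa, pvPt_shift]
    constructor
    · rintro (((hxa | hxb) | ⟨k, hkF, hch, rfl⟩) | ⟨k, hkF, hch, rfl⟩)
      · exact ⟨by rw [hxa]; exact ha, 1, by rw [hxa, hpa]⟩
      · exact ⟨by rw [hxb]; exact hb, 0, by rw [hxb, pvPt_zero]⟩
      · refine ⟨hch k (by omega), (1 + ((k : Int) + 1)), ?_⟩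
        rw [hshifta]
      · exact ⟨hch k (by omega), -((k : Int) + 1), rfl⟩
    · rintro ⟨hx, k, rfl⟩
      rcases lt_trichotomy k 0 with hneg | rfl | hpos
      · -- backward loop reaches pvPt b d k
        right
        have hchain : ∀ j : Nat, j ≤ (-k - 1).toNat →
            pvInGrid R C (pvPt b d (-((j : Int) + 1))) = true := by
          intro j hj
          apply pvConvex R C b d k _ hb hx
          right
          constructor <;> omega
        have hnd : ((-d.1, -d.2) : Int × Int) ≠ (0, 0) := by
          intro hc
          apply hd0
          have h1 : -d.1 = 0 := congrArg Prod.fst hc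
          have h2 : -d.2 = 0 := congrArg Prod.snd hc
          exact Prod.ext (by omega) (by omega)
        have hbnd : ((-k - 1).toNat : Int) < R + C := by
          have hch2 : ∀ j : Nat, j ≤ (-k).toNat → pvInGrid R C (pvPt b (-d.1, -d.2) (j : Int)) = true := by
            intro j hj
            have hp : pvPt b (-d.1, -d.2) (j : Int) = pvPt b d (-(j : Int)) := by
              simp only [pvPt, Prod.mk.injEq]; constructor <;> ring
            rw [hp]
            apply pvConvex R C b d k _ hb hx
            right
            constructor <;> omega
          have := pvChainBound R C (-d.1, -d.2) hnd b (-k).toNat hch2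
          omega
        refine ⟨(-k - 1).toNat, by omega, hchain, ?_⟩
        congr 1
        omega
      · left; left; right
        exact pvPt_zero b d
      · rcases eq_or_lt_of_le (by omega : (1 : Int) ≤ k) with h1 | h2
        · left; left; left
          rw [← h1, hpa]
        · -- forward loop reaches pvPt b d k (k ≥ 2)
          left; right
          have hchain : ∀ j : Nat, j ≤ (k - 2).toNat →
              pvInGrid R C (pvPt a d ((j : Int) + 1)) = true := by
            intro j hj
            rw [hshifta]
            apply pvConvex R C b d k _ hb hx
            left
            constructor <;> omega
          have hbnd : ((k - 2).toNat : Int) < R + C := by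
            have hch2 : ∀ j : Nat, j ≤ k.toNat → pvInGrid R C (pvPt b d (j : Int)) = true := by
              intro j hj
              apply pvConvex R C b d k _ hb hx
              left
              constructor <;> omega
            have := pvChainBound R C d hd0 b k.toNat hch2
            omega
          refine ⟨(k - 2).toNat, by omega, hchain, ?_⟩
          rw [hshifta]
          congr 1
          omega

-- closed-form membership test of Source B is exactly 'some integer multiple'
theorem pvOnLine_iff (pr pc dr dc : Int) :
    pbOnLine pr pc dr dc = true ↔ ∃ k : Int, pr = k * dr ∧ pc = k * dc := by
  unfold pbOnLine
  split_ifs with h1 h2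
  · simp only [Bool.and_eq_true, decide_eq_true_eq, PySem.Int.mod_eq_zero_iff_dvd]
    constructor
    · rintro ⟨⟨k, rfl⟩, hcr⟩
      refine ⟨k, by ring, ?_⟩
      have : pc * dr = (k * dc) * dr := by rw [hcr]; ring
      exact mul_right_cancel₀ h1 this
    · rintro ⟨k, rfl, rfl⟩
      exact ⟨⟨k, by ring⟩, by ring⟩
  · simp only [Bool.and_eq_true, decide_eq_true_eq, PySem.Int.mod_eq_zero_iff_dvd]
    push_neg at h1
    subst h1
    constructor
    · rintro ⟨rfl, ⟨k, rfl⟩⟩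
      exact ⟨k, by ring, by ring⟩
    · rintro ⟨k, h, rfl⟩
      exact ⟨by omega, ⟨k, by ring⟩⟩
  · push_neg at h1 h2
    subst h1; subst h2
    simp only [Bool.and_eq_true, decide_eq_true_eq]
    constructor
    · rintro ⟨rfl, rfl⟩; exact ⟨0, by ring, by ring⟩
    · rintro ⟨k, rfl, rfl⟩; exact ⟨by ring, by ring⟩

-- generic: membership in a fold whose step contributes Q i
theorem pvFoldlMem {ι σ α : Type} [Membership α σ] (f : σ → ι → σ) (Q : ι → α → Prop) :
    ∀ (l : List ι), (∀ i ∈ l, ∀ (s : σ) (x : α), x ∈ f s i ↔ x ∈ s ∨ Q i x) →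
      ∀ (s : σ) (x : α), x ∈ l.foldl f s ↔ x ∈ s ∨ ∃ i ∈ l, Q i x := by
  intro l
  induction l with
  | nil => intro _ s x; simp
  | cons i t ih =>
    intro hstep s x
    simp only [List.foldl_cons]
    rw [ih (fun i hi => hstep i (List.mem_cons_of_mem _ hi)),
      hstep i List.mem_cons_self s x]
    constructor
    · rintro ((hx | hq) | ⟨i', hi', hq⟩)
      · exact Or.inl hx
      · exact Or.inr ⟨i, List.mem_cons_self, hq⟩
      · exact Or.inr ⟨i', List.mem_cons_of_mem _ hi', hq⟩
    · rintro (hx | ⟨i', hi', hq⟩)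
      · exact Or.inl (Or.inl hx)
      · rcases List.mem_cons.mp hi' with rfl | hi''
        · exact Or.inl (Or.inr hq)
        · exact Or.inr ⟨i', hi'', hq⟩

theorem pvNodupFoldl (f : PySem.Set (Int × Int) → (Char × List (Int × Int)) → PySem.Set (Int × Int)) :
    ∀ (l : List (Char × List (Int × Int))), (∀ i ∈ l, ∀ s, s.Nodup → (f s i).Nodup) →
      ∀ s, s.Nodup → (l.foldl f s).Nodup := by
  intro l
  induction l with
  | nil => intro _ s h; exact h
  | cons i t ih =>
    intro hstep s h
    simp only [List.foldl_cons]
    exact ih (fun i hi => hstep i (List.mem_cons_of_mem _ hi)) _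
      (hstep i (List.mem_cons_self) s h)

theorem pvNodupFoldl' (f : PySem.Set (Int × Int) → Int → PySem.Set (Int × Int)) :
    ∀ (l : List Int), (∀ i ∈ l, ∀ s, s.Nodup → (f s i).Nodup) →
      ∀ s, s.Nodup → (l.foldl f s).Nodup := by
  intro l
  induction l with
  | nil => intro _ s h; exact h
  | cons i t ih =>
    intro hstep s h
    simp only [List.foldl_cons]
    exact ih (fun i hi => hstep i (List.mem_cons_of_mem _ hi)) _
      (hstep i (List.mem_cons_self) s h)

theorem pvFoldlCongr {α β : Type} (f g : β → α → β) :
    ∀ (l : List α), (∀ b, ∀ a ∈ l, f b a = g b a) → ∀ b, l.foldl f b = l.foldl g b := by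
  intro l
  induction l with
  | nil => intro _ b; rfl
  | cons x t ih =>
    intro h b
    simp only [List.foldl_cons]
    rw [h b x (List.mem_cons_self), ih (fun b a ha => h b a (List.mem_cons_of_mem _ ha))]

theorem pvEnumMap {α β : Type} (g : α → β) :
    ∀ (l : List α) (s : Int), PySem.List.enumerate (l.map g) s =
      (PySem.List.enumerate l s).map (fun p => (p.1, g p.2)) := by
  intro l
  induction l with
  | nil => intro s; simp [PySem.List.enumerate_nil]
  | cons x t ih => intro s; simp [PySem.List.enumerate_cons, ih]

theorem pvNodesEq (grid : List String) : paGetNodes (grid.map String.toList) = pbAnts grid := by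
  show (PySem.List.enumerate (grid.map String.toList) 0).foldl _ PySem.Dict.empty =
    (PySem.List.enumerate grid 0).foldl _ PySem.Dict.empty
  rw [pvEnumMap, List.foldl_map]
  congr 1
  funext nodes ir
  dsimp only
  apply pvFoldlCongr
  intro d jc _hm
  by_cases hdot : jc.2 ≠ '.'
  · rw [if_pos hdot, if_pos hdot]
    by_cases hc : d.contains jc.2 = true
    · rw [PySem.Dict.setdefault_of_contains _ _ hc]
      simp [hc]
    · rw [PySem.Dict.setdefault_of_not_contains _ _ (by simpa using hc)]
      simp [hc]
  · rw [if_neg hdot, if_neg hdot]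

theorem pvInnerInv (R C : Int) (i : Int) (hi : 0 ≤ i ∧ i < R) :
    ∀ (l : List (Int × Char)), (∀ q ∈ l, q.2 ≠ '.' → 0 ≤ q.1 ∧ q.1 < C) →
      ∀ d : PySem.Dict Char (List (Int × Int)), d.keys.Nodup →
        (∀ c p, p ∈ d.getD c [] → pvInGrid R C p = true) →
        ((l.foldl (fun ants jc => if jc.2 ≠ '.' then
            (ants.setdefault jc.2 []).insert jc.2
              ((ants.setdefault jc.2 []).getD jc.2 [] ++ [(i, jc.1)]) else ants) d).keys.Nodup ∧
         ∀ c p, p ∈ (l.foldl (fun ants jc => if jc.2 ≠ '.' then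
            (ants.setdefault jc.2 []).insert jc.2
              ((ants.setdefault jc.2 []).getD jc.2 [] ++ [(i, jc.1)]) else ants) d).getD c [] →
           pvInGrid R C p = true) := by
  intro l
  induction l with
  | nil => intro _ d hk hv; exact ⟨hk, hv⟩
  | cons x t ih =>
    intro hq d hk hv
    simp only [List.foldl_cons]
    by_cases hdot : x.2 ≠ '.'
    · rw [if_pos hdot]
      have hsdk : (d.setdefault x.2 []).keys.Nodup := by
        by_cases hc : d.contains x.2 = true
        · rw [PySem.Dict.setdefault_of_contains _ _ hc]; exact hk
        · rw [PySem.Dict.setdefault_of_not_contains _ _ (by simpa using hc)]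
          exact PySem.Dict.nodup_keys_insert _ _ _ hk
      have hsdv : ∀ c p, p ∈ (d.setdefault x.2 []).getD c [] → pvInGrid R C p = true := by
        intro c p hp
        by_cases hc : d.contains x.2 = true
        · rw [PySem.Dict.setdefault_of_contains _ _ hc] at hp; exact hv c p hp
        · rw [PySem.Dict.setdefault_of_not_contains _ _ (by simpa using hc)] at hp
          by_cases hcc : c = x.2
          · subst hcc
            rw [PySem.Dict.getD_insert] at hp
            simp at hp
          · rw [PySem.Dict.getD_insert] at hp
            rw [if_neg hcc] at hp
            exact hv c p hp
      apply ih (fun q hqt => hq q (List.mem_cons_of_mem _ hqt))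
      · exact PySem.Dict.nodup_keys_insert _ _ _ hsdk
      · intro c p hp
        by_cases hcc : c = x.2
        · subst hcc
          rw [PySem.Dict.getD_insert, if_pos rfl] at hp
          rcases List.mem_append.mp hp with hold | hnew
          · exact hsdv _ p hold
          · have hx := hq x (List.mem_cons_self) hdot
            have : p = (i, x.1) := by simpa using hnew
            subst this
            simp only [pvInGrid, Bool.and_eq_true, decide_eq_true_eq]
            exact ⟨⟨⟨hi.1, hi.2⟩, hx.1⟩, hx.2⟩
        · rw [PySem.Dict.getD_insert, if_neg hcc] at hp
          exact hsdv c p hp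
    · rw [if_neg hdot]
      exact ih (fun q hqt => hq q (List.mem_cons_of_mem _ hqt)) d hk hv

theorem pvOuterInv (R C : Int) :
    ∀ (l : List (Int × String)), (∀ ir ∈ l, (0 ≤ ir.1 ∧ ir.1 < R) ∧
        (∀ q ∈ PySem.List.enumerate ir.2.toList 0, q.2 ≠ '.' → 0 ≤ q.1 ∧ q.1 < C)) →
      ∀ d : PySem.Dict Char (List (Int × Int)), d.keys.Nodup →
        (∀ c p, p ∈ d.getD c [] → pvInGrid R C p = true) →
        ((l.foldl (fun ants ir => (PySem.List.enumerate ir.2.toList 0).foldl (fun ants jc =>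
            if jc.2 ≠ '.' then (ants.setdefault jc.2 []).insert jc.2
              ((ants.setdefault jc.2 []).getD jc.2 [] ++ [(ir.1, jc.1)]) else ants) ants) d).keys.Nodup ∧
         ∀ c p, p ∈ (l.foldl (fun ants ir => (PySem.List.enumerate ir.2.toList 0).foldl (fun ants jc =>
            if jc.2 ≠ '.' then (ants.setdefault jc.2 []).insert jc.2
              ((ants.setdefault jc.2 []).getD jc.2 [] ++ [(ir.1, jc.1)]) else ants) ants) d).getD c [] →
           pvInGrid R C p = true) := by
  intro l
  induction l with
  | nil => intro _ d hk hv; exact ⟨hk, hv⟩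
  | cons x t ih =>
    intro hr d hk hv
    simp only [List.foldl_cons]
    have hx := hr x (List.mem_cons_self)
    have hstep := pvInnerInv R C x.1 hx.1 (PySem.List.enumerate x.2.toList 0) hx.2 d hk hv
    exact ih (fun ir hir => hr ir (List.mem_cons_of_mem _ hir)) _ hstep.1 hstep.2

theorem pvAntsInv (grid : List String) (C : Int)
    (hpre : ∀ ir ∈ PySem.List.enumerate grid 0, ∀ jc ∈ PySem.List.enumerate ir.2.toList 0,
      jc.2 ≠ '.' → jc.1 < C) :
    ∀ kv ∈ (pbAnts grid).items, ∀ p ∈ kv.2, pvInGrid (grid.length) C p = true := by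
  have h := pvOuterInv (grid.length) C (PySem.List.enumerate grid 0) ?_ PySem.Dict.empty ?_ ?_
  · intro kv hkv p hp
    have hg : (pbAnts grid).getD kv.1 [] = kv.2 := by
      apply PySem.Dict.getD_of_mem_items
      · exact (show (kv.1, kv.2) ∈ (pbAnts grid).items from by simpa using hkv)
      · exact h.1
    apply h.2 kv.1 p
    show p ∈ (pbAnts grid).getD kv.1 []
    rw [hg]
    exact hp
  · intro ir hir
    constructor
    · rcases (PySem.List.mem_enumerate_iff _ _ _).mp hir with ⟨k, hklt, rfl⟩
      constructor
      · omega
      · simpa using hklt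
    · intro q hq hqdot
      refine ⟨?_, hpre ir hir q hq hqdot⟩
      rcases (PySem.List.mem_enumerate_iff _ _ _).mp hq with ⟨k, hklt, rfl⟩
      omega
  · simp [PySem.Dict.empty, PySem.Dict.keys]
  · intro c p hp
    rw [PySem.Dict.getD_of_not_contains] at hp
    · exact absurd hp (List.not_mem_nil)
    · rfl

theorem pvHeadLen (l : List String) :
    ((((List.map String.toList l).headD []).length : Nat) : Int) = PySem.Str.len (l.headD "") := by
  cases l with
  | nil => simp [PySem.Str.len_eq]
  | cons x t => simp [PySem.Str.len_eq]

theorem pvGetDMem (vals : List (Int × Int)) (t : Int) (h0 : 0 ≤ t) (hlt : t < (vals.length : Int)) :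
    PySem.List.pyGetD vals t ((0:Int),(0:Int)) ∈ vals := by
  rw [PySem.List.pyGetD_of_nonneg _ _ h0]
  have hlt' : t.toNat < vals.length := by omega
  rw [List.getD_eq_getElem?_getD, List.getElem?_eq_getElem hlt']
  exact List.getElem_mem _

-- the nodup cell list underlying B's count
theorem pvNodupProd (lr lc : List Int) (p : Int → Int → Bool)
    (h1 : lr.Nodup) (h2 : lc.Nodup) :
    (lr.flatMap (fun r => (lc.filter (fun c => p r c)).map (fun c => (r, c)))).Nodup := by
  induction lr with
  | nil => simp
  | cons r t ih =>
    simp only [List.flatMap_cons, List.nodup_append]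
    rcases List.nodup_cons.mp h1 with ⟨hr, ht⟩
    refine ⟨?_, ih ht, ?_⟩
    · exact ((h2.filter _).map (fun a b h => by
        have := congrArg Prod.snd h; simpa using this))
    · intro x hx y hy
      rcases List.mem_map.mp hx with ⟨c, _, rfl⟩
      rcases List.mem_flatMap.mp hy with ⟨r', hr', hmem⟩
      rcases List.mem_map.mp hmem with ⟨c', _, rfl⟩
      intro he
      apply hr
      have hre : r = r' := by
        have := congrArg Prod.fst he
        simpa using this
      exact hre ▸ hr'

theorem pvCountFold (l : List Int) (p : Int → Bool) (a : Int) :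
    l.foldl (fun cnt c => if p c then cnt + 1 else cnt) a = a + ((l.countP p : Nat) : Int) :=
  PySem.List.foldl_if_add_one p l a

theorem pvSetLen (s : PySem.Set (Int × Int)) : PySem.Set.len s = (s.length : Int) := rfl

theorem pvGridCount (lr lc : List Int) (p : Int → Int → Bool) :
    ∀ a : Int, lr.foldl (fun cnt r => lc.foldl (fun cnt c => if p r c then cnt + 1 else cnt) cnt) a
      = a + (((lr.flatMap (fun r => (lc.filter (fun c => p r c)).map (fun c => (r, c)))).length : Nat) : Int) := by
  induction lr with
  | nil => intro a; simp
  | cons r t ih =>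
    intro a
    simp only [List.foldl_cons, List.flatMap_cons, List.length_append, List.length_map]
    rw [pvCountFold, ih]
    have hc : (lc.countP (fun c => p r c)) = (lc.filter (fun c => p r c)).length :=
      List.countP_eq_length_filter
    push_cast [hc]
    ring

-- coordinates form of the closed-form test
theorem pvOnLinePt (a b x : Int × Int) :
    pbOnLine (x.1 - b.1) (x.2 - b.2) (a.1 - b.1) (a.2 - b.2) = true ↔
      ∃ k : Int, x = pvPt b (a.1 - b.1, a.2 - b.2) k := by
  rw [pvOnLine_iff]
  constructor
  · rintro ⟨k, h1, h2⟩
    refine ⟨k, Prod.ext ?_ ?_⟩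
    · show x.1 = b.1 + k * (a.1 - b.1)
      linarith
    · show x.2 = b.2 + k * (a.2 - b.2)
      linarith
  · rintro ⟨k, rfl⟩
    exact ⟨k, by dsimp [pvPt]; ring, by dsimp [pvPt]; ring⟩

-- the whole computation, over an arbitrary antenna dictionary whose positions are in the grid
theorem pvMain (R C : Int) (items : List (Char × List (Int × Int)))
    (hin : ∀ kv ∈ items, ∀ p ∈ kv.2, pvInGrid R C p = true) :
    PySem.Set.len (items.foldl (fun s kv =>
      if kv.2.length == 1 then s
      else (PySem.List.pyRange 0 kv.2.length 1).foldl (fun s i =>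
        (PySem.List.pyRange (i+1) kv.2.length 1).foldl (fun s j =>
          PySem.Set.update s (paFind R C
            (PySem.List.pyGetD kv.2 i ((0:Int),(0:Int)))
            (PySem.List.pyGetD kv.2 j ((0:Int),(0:Int))))) s) s)
      PySem.Set.empty)
    = (PySem.List.pyRange 0 R 1).foldl (fun cnt r =>
        (PySem.List.pyRange 0 C 1).foldl (fun cnt c =>
          if (items.foldl (fun ps kv =>
              (PySem.List.pyRange 0 kv.2.length 1).foldl (fun ps i =>
                (PySem.List.pyRange (i+1) kv.2.length 1).foldl (fun ps j =>
                  ps ++ [(PySem.List.pyGetD kv.2 i ((0:Int),(0:Int)),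
                          PySem.List.pyGetD kv.2 j ((0:Int),(0:Int)))]) ps) ps)
              ([] : List ((Int × Int) × (Int × Int)))).any
              (fun ab => pbOnLine (r - ab.2.1) (c - ab.2.2) (ab.1.1 - ab.2.1) (ab.1.2 - ab.2.2))
          then cnt + 1 else cnt) cnt) (0 : Int) := by
  set pairs : List ((Int × Int) × (Int × Int)) := items.foldl (fun ps kv =>
      (PySem.List.pyRange 0 kv.2.length 1).foldl (fun ps i =>
        (PySem.List.pyRange (i+1) kv.2.length 1).foldl (fun ps j =>
          ps ++ [(PySem.List.pyGetD kv.2 i ((0:Int),(0:Int)),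
                  PySem.List.pyGetD kv.2 j ((0:Int),(0:Int)))]) ps) ps) [] with hpairs
  set pred : Int → Int → Bool := fun r c =>
      pairs.any (fun ab => pbOnLine (r - ab.2.1) (c - ab.2.2) (ab.1.1 - ab.2.1) (ab.1.2 - ab.2.2))
    with hpred
  set U : PySem.Set (Int × Int) := items.foldl (fun s kv =>
      if kv.2.length == 1 then s
      else (PySem.List.pyRange 0 kv.2.length 1).foldl (fun s i =>
        (PySem.List.pyRange (i+1) kv.2.length 1).foldl (fun s j =>
          PySem.Set.update s (paFind R C
            (PySem.List.pyGetD kv.2 i ((0:Int),(0:Int)))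
            (PySem.List.pyGetD kv.2 j ((0:Int),(0:Int))))) s) s)
      PySem.Set.empty with hUdef
  set L : List (Int × Int) := (PySem.List.pyRange 0 R 1).flatMap (fun r =>
      ((PySem.List.pyRange 0 C 1).filter (fun c => pred r c)).map (fun c => (r, c))) with hLdef
  -- pair-list membership
  have hpairsMem : ∀ pr : (Int × Int) × (Int × Int), pr ∈ pairs ↔
      ∃ kv ∈ items, ∃ i ∈ PySem.List.pyRange 0 (kv.2.length : Int) 1,
        ∃ j ∈ PySem.List.pyRange (i+1) (kv.2.length : Int) 1,
          pr = (PySem.List.pyGetD kv.2 i ((0:Int),(0:Int)),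
                PySem.List.pyGetD kv.2 j ((0:Int),(0:Int))) := by
    intro pr
    rw [hpairs]
    have h := pvFoldlMem (σ := List ((Int × Int) × (Int × Int)))
      (fun ps kv =>
        (PySem.List.pyRange 0 kv.2.length 1).foldl (fun ps i =>
          (PySem.List.pyRange (i+1) kv.2.length 1).foldl (fun ps j =>
            ps ++ [(PySem.List.pyGetD kv.2 i ((0:Int),(0:Int)),
                    PySem.List.pyGetD kv.2 j ((0:Int),(0:Int)))]) ps) ps)
      (fun kv pr => ∃ i ∈ PySem.List.pyRange 0 (kv.2.length : Int) 1,
        ∃ j ∈ PySem.List.pyRange (i+1) (kv.2.length : Int) 1,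
          pr = (PySem.List.pyGetD kv.2 i ((0:Int),(0:Int)),
                PySem.List.pyGetD kv.2 j ((0:Int),(0:Int))))
      items ?_ [] pr
    · rw [h]
      simp
    · intro kv _ s x
      dsimp only
      have h2 := pvFoldlMem (σ := List ((Int × Int) × (Int × Int)))
        (fun ps i =>
          (PySem.List.pyRange (i+1) kv.2.length 1).foldl (fun ps j =>
            ps ++ [(PySem.List.pyGetD kv.2 i ((0:Int),(0:Int)),
                    PySem.List.pyGetD kv.2 j ((0:Int),(0:Int)))]) ps)
        (fun i pr => ∃ j ∈ PySem.List.pyRange (i+1) (kv.2.length : Int) 1,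
          pr = (PySem.List.pyGetD kv.2 i ((0:Int),(0:Int)),
                PySem.List.pyGetD kv.2 j ((0:Int),(0:Int))))
        (PySem.List.pyRange 0 (kv.2.length : Int) 1) ?_ s x
      · exact h2
      · intro i _ s' x'
        dsimp only
        have h3 := pvFoldlMem (σ := List ((Int × Int) × (Int × Int)))
          (fun ps j => ps ++ [(PySem.List.pyGetD kv.2 i ((0:Int),(0:Int)),
                    PySem.List.pyGetD kv.2 j ((0:Int),(0:Int)))])
          (fun j pr => pr = (PySem.List.pyGetD kv.2 i ((0:Int),(0:Int)),
                PySem.List.pyGetD kv.2 j ((0:Int),(0:Int))))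
          (PySem.List.pyRange (i+1) (kv.2.length : Int) 1) ?_ s' x'
        · exact h3
        · intro j _ s'' x''
          simp
  -- A-side membership
  have hU : ∀ x : Int × Int, x ∈ U ↔ ∃ kv ∈ items,
      ∃ i ∈ PySem.List.pyRange 0 (kv.2.length : Int) 1,
        ∃ j ∈ PySem.List.pyRange (i+1) (kv.2.length : Int) 1,
          x ∈ paFind R C (PySem.List.pyGetD kv.2 i ((0:Int),(0:Int)))
            (PySem.List.pyGetD kv.2 j ((0:Int),(0:Int))) := by
    intro x
    rw [hUdef]
    have h := pvFoldlMem (σ := PySem.Set (Int × Int))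
      (fun s kv =>
        if kv.2.length == 1 then s
        else (PySem.List.pyRange 0 kv.2.length 1).foldl (fun s i =>
          (PySem.List.pyRange (i+1) kv.2.length 1).foldl (fun s j =>
            PySem.Set.update s (paFind R C
              (PySem.List.pyGetD kv.2 i ((0:Int),(0:Int)))
              (PySem.List.pyGetD kv.2 j ((0:Int),(0:Int))))) s) s)
      (fun kv x => ∃ i ∈ PySem.List.pyRange 0 (kv.2.length : Int) 1,
        ∃ j ∈ PySem.List.pyRange (i+1) (kv.2.length : Int) 1,
          x ∈ paFind R C (PySem.List.pyGetD kv.2 i ((0:Int),(0:Int)))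
            (PySem.List.pyGetD kv.2 j ((0:Int),(0:Int))))
      items ?_ PySem.Set.empty x
    · rw [h]
      simp [PySem.Set.empty]
    · intro kv _ s y
      dsimp only
      by_cases hlen : (kv.2.length == 1) = true
      · rw [if_pos hlen]
        have hl1 : kv.2.length = 1 := by simpa using hlen
        constructor
        · exact Or.inl
        · rintro (hy | ⟨i, hi, j, hj, _⟩)
          · exact hy
          · rw [PySem.List.mem_pyRange_one] at hi hj
            rw [hl1] at hi hj
            omega
      · rw [if_neg hlen]
        have h2 := pvFoldlMem (σ := PySem.Set (Int × Int))
          (fun s i =>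
            (PySem.List.pyRange (i+1) kv.2.length 1).foldl (fun s j =>
              PySem.Set.update s (paFind R C
                (PySem.List.pyGetD kv.2 i ((0:Int),(0:Int)))
                (PySem.List.pyGetD kv.2 j ((0:Int),(0:Int))))) s)
          (fun i x => ∃ j ∈ PySem.List.pyRange (i+1) (kv.2.length : Int) 1,
            x ∈ paFind R C (PySem.List.pyGetD kv.2 i ((0:Int),(0:Int)))
              (PySem.List.pyGetD kv.2 j ((0:Int),(0:Int))))
          (PySem.List.pyRange 0 (kv.2.length : Int) 1) ?_ s y
        · exact h2
        · intro i _ s' y'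
          dsimp only
          have h3 := pvFoldlMem (σ := PySem.Set (Int × Int))
            (fun s j => PySem.Set.update s (paFind R C
                (PySem.List.pyGetD kv.2 i ((0:Int),(0:Int)))
                (PySem.List.pyGetD kv.2 j ((0:Int),(0:Int)))))
            (fun j x => x ∈ paFind R C (PySem.List.pyGetD kv.2 i ((0:Int),(0:Int)))
                (PySem.List.pyGetD kv.2 j ((0:Int),(0:Int))))
            (PySem.List.pyRange (i+1) (kv.2.length : Int) 1) ?_ s' y'
          · exact h3
          · intro j _ s'' y''
            dsimp only
            exact PySem.Set.mem_update s'' _ y''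
  -- the common line predicate
  have hUchar : ∀ x : Int × Int, x ∈ U ↔ pvInGrid R C x = true ∧ pred x.1 x.2 = true := by
    intro x
    rw [hU x, hpred]
    simp only [List.any_eq_true]
    constructor
    · rintro ⟨kv, hkv, i, hi, j, hj, hx⟩
      rw [PySem.List.mem_pyRange_one] at hi hj
      rw [memFind R C _ _
        (hin kv hkv _ (pvGetDMem kv.2 i hi.1 hi.2))
        (hin kv hkv _ (pvGetDMem kv.2 j (by omega) hj.2)) x] at hx
      obtain ⟨hg, k, hk⟩ := hx
      refine ⟨hg, ⟨(PySem.List.pyGetD kv.2 i ((0:Int),(0:Int)),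
                    PySem.List.pyGetD kv.2 j ((0:Int),(0:Int))), ?_, ?_⟩⟩
      · rw [hpairsMem]
        exact ⟨kv, hkv, i, by rw [PySem.List.mem_pyRange_one]; exact hi, j,
          by rw [PySem.List.mem_pyRange_one]; exact hj, rfl⟩
      · exact (pvOnLinePt _ _ x).mpr ⟨k, hk⟩
    · rintro ⟨hg, ab, hab, hol⟩
      rw [hpairsMem] at hab
      obtain ⟨kv, hkv, i, hi, j, hj, rfl⟩ := hab
      obtain ⟨k, hk⟩ := (pvOnLinePt _ _ x).mp hol
      rw [PySem.List.mem_pyRange_one] at hi hj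
      refine ⟨kv, hkv, i, by rw [PySem.List.mem_pyRange_one]; exact hi, j,
        by rw [PySem.List.mem_pyRange_one]; exact hj, ?_⟩
      rw [memFind R C _ _
        (hin kv hkv _ (pvGetDMem kv.2 i hi.1 hi.2))
        (hin kv hkv _ (pvGetDMem kv.2 j (by omega) hj.2)) x]
      exact ⟨hg, k, hk⟩
  -- L membership
  have hL : ∀ x : Int × Int, x ∈ L ↔ pvInGrid R C x = true ∧ pred x.1 x.2 = true := by
    intro x
    rw [hLdef]
    simp only [List.mem_flatMap, List.mem_map, List.mem_filter, PySem.List.mem_pyRange_one]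
    constructor
    · rintro ⟨r, hr, c, ⟨hc, hp⟩, rfl⟩
      constructor
      · simp only [pvInGrid, Bool.and_eq_true, decide_eq_true_eq]
        exact ⟨⟨⟨hr.1, hr.2⟩, hc.1⟩, hc.2⟩
      · exact hp
    · rintro ⟨hg, hp⟩
      simp only [pvInGrid, Bool.and_eq_true, decide_eq_true_eq] at hg
      exact ⟨x.1, ⟨hg.1.1.1, hg.1.1.2⟩, x.2, ⟨⟨hg.1.2, hg.2⟩, hp⟩, rfl⟩
  -- nodup on both sides
  have hnU : U.Nodup := by
    rw [hUdef]
    apply pvNodupFoldl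
    · intro kv _ s hs
      by_cases hlen : (kv.2.length == 1) = true
      · rw [if_pos hlen]; exact hs
      · rw [if_neg hlen]
        apply pvNodupFoldl'
        · intro i _ s' hs'
          apply pvNodupFoldl'
          · intro j _ s'' hs''
            exact PySem.Set.nodup_update _ _ hs''
          · exact hs'
        · exact hs
    · exact List.nodup_nil
  have hnL : L.Nodup :=
    pvNodupProd _ _ _ (PySem.List.nodup_pyRange_one _ _) (PySem.List.nodup_pyRange_one _ _)
  -- count
  have hB := pvGridCount (PySem.List.pyRange 0 R 1) (PySem.List.pyRange 0 C 1) pred 0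
  rw [hB, ← hLdef, zero_add, pvSetLen]
  have hperm : U.Perm L := (List.perm_ext_iff_of_nodup hnU hnL).mpr (fun x => by
    rw [hUchar x, hL x])
  rw [hperm.length_eq]

-- ===== VERDICT =====
theorem part2_spec : Claim_equal_part2 := by
  unfold Claim_equal_part2
  intro data _hdom hpre
  unfold Spec_part2 part2 part2_alt
  unfold Pre_part2 at hpre
  simp only [PySem.Dict.values, List.foldl_map, List.length_map, pvHeadLen, pvNodesEq]
  set grid : List String := (PySem.Str.split? (PySem.Str.strip data) "\n").getD [] with hgrid
  set R : Int := (grid.length : Int) with hR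
  set C : Int := PySem.Str.len (grid.headD "") with hC
  have hin : ∀ kv ∈ (pbAnts grid).items, ∀ p ∈ kv.2, pvInGrid R C p = true := by
    apply pvAntsInv grid C
    intro ir hir jc hjc hdot
    rcases (PySem.List.mem_enumerate_iff _ _ _).mp hir with ⟨k, hklt, rfl⟩
    exact hpre _ (List.getElem_mem hklt) jc hjc hdot
  exact pvMain R C (pbAnts grid).items hin
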